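-- pv_equiv track=rewrite | github.com/MrBrantCode/unitest_baseline | mut_generate/mist_train_cf/cf_75948/solution.py | intricate_sort
-- ===== SOURCE A (Python) =====
-- def intricate_sort(details):
--     for group in details:
--         sorted_group = sorted(group)
--         reversed_group = sorted(group, reverse=True)
--
--         if group != sorted_group and group != reversed_group:
--             if len(group) > 1:
--                 group.remove(min(group))
--             else:
--                 return False
--
--             if group != sorted(group) and group != sorted(group, reverse=True):
--                 return False
--
--     return sorted([item for sublist in details for item in sublist]) == [item for sublist in details for item in sublist]
-- ===== SOURCE B (Python) =====
-- def _mono(g):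
--     # one fused scan: a list is monotone (asc or desc) iff it does not contain
--     # both a strict rise and a strict fall among adjacent pairs
--     inc = dec = False
--     for a, b in zip(g, g[1:]):
--         if a < b:
--             inc = True
--         elif a > b:
--             dec = True
--     return not (inc and dec)
--
-- def intricate_sort(details):
--     # Single fused left-to-right pass carrying the previous element: no sorting,
--     # no flattening stage, early exit. (Unlike A, it does not mutate the caller's
--     # lists: the min-removal happens on a copy; the RETURN value is identical.)
--     prev = None
--     for group in details:
--         g = group
--         if not _mono(g):
--             g = list(g)
--             g.remove(min(g))
--             if not _mono(g):
--                 return False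
--         for x in g:
--             if prev is not None and x < prev:
--                 return False
--             prev = x
--     return True
-- ===== Notes on version B (the rewrite author's own statement) =====
-- stated objective: alternative
-- what changed: Replaces A's staged design (per-group sorted()-copies and comparisons, in-place mutation, then flatten + sort + compare) by one fused left-to-right pass that classifies each group as monotone with a single rise/fall-flag scan, removes the min on a copy only when needed, and checks global order incrementally against the previous element with early exit; B does not mutate the caller's lists.
import Mathlib
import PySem

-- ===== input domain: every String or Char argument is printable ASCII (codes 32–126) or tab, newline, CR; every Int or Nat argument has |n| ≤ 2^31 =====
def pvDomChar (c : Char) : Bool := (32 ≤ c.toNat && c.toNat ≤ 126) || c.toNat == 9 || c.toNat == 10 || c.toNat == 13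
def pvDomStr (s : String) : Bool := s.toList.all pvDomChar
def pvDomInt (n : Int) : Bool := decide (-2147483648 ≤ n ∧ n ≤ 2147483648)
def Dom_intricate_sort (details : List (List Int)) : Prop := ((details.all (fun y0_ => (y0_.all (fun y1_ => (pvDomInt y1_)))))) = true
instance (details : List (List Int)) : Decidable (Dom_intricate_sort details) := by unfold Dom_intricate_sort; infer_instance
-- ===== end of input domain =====

-- B replaces A's staged design (per-group sorted() copies + mutation, then flatten/sort/compare) by one fused
-- left-to-right pass: a rise/fall-flag scan classifies each group as monotone and a carried previous element
-- checks global order with early exit. A mutates its argument's groups in place; B removes the min on a copy,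
-- so the equivalence proved here is about the RETURN value only.


-- shared by both ports: g.remove(min(g)) (the identical statement appears in both Pythons);
-- the getD fallbacks only make it total — they are unreachable under the guards
def pvRemoveMin (g : List Int) : List Int :=
  match PySem.List.min? g (fun x => x) with
  | none => g
  | some m => (PySem.List.remove? g m).getD g

-- ===== PORT A =====
-- the for-loop: returns none on an early `return False`, else the mutated list of groups
def pvLoopA : List (List Int) → Option (List (List Int))
  | [] => some []
  | g :: rest =>
    let sg := PySem.List.sorted g (fun x => x) false
    let rg := PySem.List.sorted g (fun x => x) true
    if g ≠ sg ∧ g ≠ rg then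
      if g.length > 1 then
        let g' := pvRemoveMin g
        if g' ≠ PySem.List.sorted g' (fun x => x) false ∧
           g' ≠ PySem.List.sorted g' (fun x => x) true then none
        else (pvLoopA rest).map (g' :: ·)
      else none
    else (pvLoopA rest).map (g :: ·)

def intricate_sort (details : List (List Int)) : Bool :=
  match pvLoopA details with
  | none => false
  | some ds =>
    let flat := ds.flatten
    decide (PySem.List.sorted flat (fun x => x) false = flat)

-- ===== PORT B =====
-- _mono: single scan over adjacent pairs tracking a strict-rise flag and a strict-fall flag
def pvMono (g : List Int) : Bool :=
  let r := (g.zip g.tail).foldl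
    (fun (s : Bool × Bool) p =>
      if p.1 < p.2 then (true, s.2)
      else if p.2 < p.1 then (s.1, true)
      else s) (false, false)
  !(r.1 && r.2)

-- the inner `for x in g` loop: none = early `return False`, else the updated prev
def pvScanGroup : Option Int → List Int → Option (Option Int)
  | prev, [] => some prev
  | prev, x :: rest =>
    match prev with
    | some p => if x < p then none else pvScanGroup (some x) rest
    | none => pvScanGroup (some x) rest

def pvLoopB : Option Int → List (List Int) → Bool
  | _, [] => true
  | prev, group :: rest =>
    let fixed : Option (List Int) :=
      if pvMono group then some group
      else
        let g' := pvRemoveMin group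
        if pvMono g' then some g' else none
    match fixed with
    | none => false
    | some g =>
      match pvScanGroup prev g with
      | none => false
      | some prev' => pvLoopB prev' rest

def intricate_sort_alt (details : List (List Int)) : Bool :=
  pvLoopB none details

-- ===== PRECONDITION & SPEC =====
def Spec_intricate_sort (details : List (List Int)) (out : Bool) : Prop := out = intricate_sort_alt details
instance (details : List (List Int)) (out : Bool) : Decidable (Spec_intricate_sort details out) := by unfold Spec_intricate_sort; infer_instance

-- ===== CLAIM (what is proved, stated in full; the proofs are below) =====
def Claim_equal_intricate_sort : Prop := ∀ (details : List (List Int)), Dom_intricate_sort details → Spec_intricate_sort details (intricate_sort details)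

-- ===== LEMMAS AND PROOFS =====

-- proof-only helpers: adjacent-pair sortedness predicates and the flat-list chain check
def pvAsc (g : List Int) : Bool := (g.zip g.tail).all (fun p => p.1 ≤ p.2)
def pvDesc (g : List Int) : Bool := (g.zip g.tail).all (fun p => p.2 ≤ p.1)

def pvChain : Option Int → List Int → Bool
  | _, [] => true
  | prev, x :: rest =>
    match prev with
    | some p => if x < p then false else pvChain (some x) rest
    | none => pvChain (some x) rest

theorem pvAsc_iff_pairwise (g : List Int) : pvAsc g = true ↔ g.Pairwise (· ≤ ·) := by
  rw [← List.isChain_iff_pairwise]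
  induction g with
  | nil => simp [pvAsc]
  | cons a t ih =>
    cases t with
    | nil => simp [pvAsc]
    | cons b t' =>
      simp [pvAsc] at ih ⊢
      tauto

theorem pvDesc_iff_pairwise (g : List Int) : pvDesc g = true ↔ g.Pairwise (fun a b => b ≤ a) := by
  rw [← List.isChain_iff_pairwise]
  induction g with
  | nil => simp [pvDesc]
  | cons a t ih =>
    cases t with
    | nil => simp [pvDesc]
    | cons b t' =>
      simp [pvDesc] at ih ⊢
      tauto

theorem sorted_eq_iff_asc (g : List Int) :
    PySem.List.sorted g (fun x => x) false = g ↔ pvAsc g = true := by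
  rw [pvAsc_iff_pairwise]
  constructor
  · intro h
    have := PySem.List.sorted_pairwise g (fun x => x)
    rw [h] at this
    exact this
  · exact PySem.List.sorted_eq_self_of_pairwise g (fun x => x)

theorem sorted_rev_eq_iff_desc (g : List Int) :
    PySem.List.sorted g (fun x => x) true = g ↔ pvDesc g = true := by
  rw [pvDesc_iff_pairwise]
  constructor
  · intro h
    have := PySem.List.sorted_pairwise_rev g (fun x => x)
    rw [h] at this
    exact this
  · exact PySem.List.sorted_rev_eq_self_of_pairwise g (fun x => x)

-- the flag fold computes "is there a strict rise / a strict fall"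
theorem pvFlags_spec (l : List (Int × Int)) (s : Bool × Bool) :
    l.foldl (fun (s : Bool × Bool) p =>
        if p.1 < p.2 then (true, s.2)
        else if p.2 < p.1 then (s.1, true)
        else s) s
      = (s.1 || l.any (fun p => decide (p.1 < p.2)), s.2 || l.any (fun p => decide (p.2 < p.1))) := by
  induction l generalizing s with
  | nil => simp
  | cons p t ih =>
    simp only [List.foldl_cons, List.any_cons, ih]
    by_cases h1 : p.1 < p.2
    · have h2 : ¬ p.2 < p.1 := by omega
      simp [h1, h2]
    · by_cases h2 : p.2 < p.1
      · simp [h1, h2]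
      · simp [h1, h2]

-- monotone (by flags) = ascending-or-descending (by adjacent-pair scans)
theorem pvMono_eq (g : List Int) : pvMono g = (pvAsc g || pvDesc g) := by
  rw [Bool.eq_iff_iff]
  simp only [pvMono, pvFlags_spec, pvAsc, pvDesc, Bool.false_or, Bool.or_eq_true,
    Bool.not_eq_eq_eq_not, Bool.not_true, Bool.and_eq_false_iff, List.any_eq_false,
    List.all_eq_true, decide_eq_true_eq]
  constructor
  · rintro (h | h)
    · exact Or.inr (fun p hp => by have := h p hp; omega)
    · exact Or.inl (fun p hp => by have := h p hp; omega)
  · rintro (h | h)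
    · exact Or.inr (fun p hp => by have := h p hp; omega)
    · exact Or.inl (fun p hp => by have := h p hp; omega)

-- A's branch condition expressed through the scans
theorem condA_iff (g : List Int) :
    (g ≠ PySem.List.sorted g (fun x => x) false ∧ g ≠ PySem.List.sorted g (fun x => x) true)
      ↔ pvMono g = false := by
  rw [pvMono_eq]
  constructor
  · intro ⟨h1, h2⟩
    simp only [Bool.or_eq_false_iff]
    exact ⟨Bool.eq_false_iff.2 (fun h => h1 ((sorted_eq_iff_asc g).2 h).symm),
           Bool.eq_false_iff.2 (fun h => h2 ((sorted_rev_eq_iff_desc g).2 h).symm)⟩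
  · intro h
    simp only [Bool.or_eq_false_iff] at h
    constructor
    · intro hc; rw [(sorted_eq_iff_asc g).1 hc.symm] at h; simp at h
    · intro hc; rw [(sorted_rev_eq_iff_desc g).1 hc.symm] at h; simp at h

theorem pvMono_short (g : List Int) (h : g.length ≤ 1) : pvMono g = true := by
  match g with
  | [] => rfl
  | [x] => rfl
  | x :: y :: r => simp at h

theorem chain_append (g l : List Int) : ∀ prev,
    pvChain prev (g ++ l) =
      (match pvScanGroup prev g with
       | none => false
       | some p' => pvChain p' l) := by
  induction g with
  | nil => intro prev; rfl
  | cons x t ih =>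
    intro prev
    cases prev with
    | none => simpa [pvChain, pvScanGroup] using ih (some x)
    | some p =>
      by_cases h : x < p
      · simp [pvChain, pvScanGroup, h]
      · simpa [pvChain, pvScanGroup, h] using ih (some x)

theorem chain_some (l : List Int) : ∀ p, pvChain (some p) l = pvAsc (p :: l) := by
  induction l with
  | nil => intro p; rfl
  | cons x r ih =>
    intro p
    by_cases h : x < p
    · have h' : ¬ p ≤ x := by omega
      simp [pvChain, pvAsc, h, h']
    · have h' : p ≤ x := by omega
      simp only [pvChain, h, if_false, ih x]
      simp [pvAsc, h']

theorem chain_none (l : List Int) : pvChain none l = pvAsc l := by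
  cases l with
  | nil => rfl
  | cons x r => simpa [pvChain] using chain_some r x

-- B's fused loop computes: A's loop, then the chain check on the flattened fixed groups
theorem loopB_char (ds : List (List Int)) : ∀ prev,
    pvLoopB prev ds =
      (match pvLoopA ds with
       | none => false
       | some ds' => pvChain prev ds'.flatten) := by
  induction ds with
  | nil => intro prev; rfl
  | cons g rest ih =>
    intro prev
    rw [pvLoopA, pvLoopB]
    by_cases hm : pvMono g = true
    · have hc : ¬ (g ≠ PySem.List.sorted g (fun x => x) false ∧
          g ≠ PySem.List.sorted g (fun x => x) true) := by
        intro hc; rw [(condA_iff g).1 hc] at hm; simp at hm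
      simp only [hm, if_true, hc, if_false]
      cases hA : pvLoopA rest with
      | none =>
        cases hs : pvScanGroup prev g with
        | none => simp
        | some p' => simp [ih p', hA]
      | some ds' =>
        simp only [Option.map_some, List.flatten_cons, chain_append g ds'.flatten prev]
        cases hs : pvScanGroup prev g with
        | none => simp
        | some p' => simp [ih p', hA]
    · have hm' : pvMono g = false := by revert hm; cases pvMono g <;> simp
      have hc : (g ≠ PySem.List.sorted g (fun x => x) false ∧
          g ≠ PySem.List.sorted g (fun x => x) true) := (condA_iff g).2 hm'
      have hlen : g.length > 1 := by
        by_contra h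
        rw [pvMono_short g (by omega)] at hm'; simp at hm'
      simp only [hm', Bool.false_eq_true, if_false, if_pos hc, if_pos hlen]
      by_cases hm2 : pvMono (pvRemoveMin g) = true
      · have hc2 : ¬ (pvRemoveMin g ≠ PySem.List.sorted (pvRemoveMin g) (fun x => x) false ∧
            pvRemoveMin g ≠ PySem.List.sorted (pvRemoveMin g) (fun x => x) true) := by
          intro hc2; rw [(condA_iff _).1 hc2] at hm2; simp at hm2
        simp only [hm2, if_true, if_neg hc2]
        cases hA : pvLoopA rest with
        | none =>
          cases hs : pvScanGroup prev (pvRemoveMin g) with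
          | none => simp
          | some p' => simp [ih p', hA]
        | some ds' =>
          simp only [Option.map_some, List.flatten_cons, chain_append (pvRemoveMin g) ds'.flatten prev]
          cases hs : pvScanGroup prev (pvRemoveMin g) with
          | none => simp
          | some p' => simp [ih p', hA]
      · have hm2' : pvMono (pvRemoveMin g) = false := by
          revert hm2; cases pvMono (pvRemoveMin g) <;> simp
        have hc2 : (pvRemoveMin g ≠ PySem.List.sorted (pvRemoveMin g) (fun x => x) false ∧
            pvRemoveMin g ≠ PySem.List.sorted (pvRemoveMin g) (fun x => x) true) :=
          (condA_iff _).2 hm2'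
        simp [hm2', if_pos hc2]

-- ===== VERDICT (by name: the statement is the Claim_ definition above) =====
theorem intricate_sort_spec : Claim_equal_intricate_sort := by
  intro details _
  unfold Spec_intricate_sort intricate_sort intricate_sort_alt
  rw [loopB_char details none]
  cases pvLoopA details with
  | none => rfl
  | some ds =>
    simp only [chain_none]
    cases hf : pvAsc ds.flatten with
    | false =>
      have hns : ¬ (PySem.List.sorted ds.flatten (fun x => x) false = ds.flatten) := by
        intro hc; rw [(sorted_eq_iff_asc ds.flatten).1 hc] at hf; simp at hf
      rw [decide_eq_false hns]
    | true =>
      rw [decide_eq_true ((sorted_eq_iff_asc ds.flatten).2 hf)]
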